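-- pv_equiv track=rewrite | github.com/securifera/agentscope | src/agentscope/memory/_pruning/_strategies.py | take_head_from_joined_text
-- ===== SOURCE A (Python) =====
-- from typing import Tuple, Optional, List
--
-- def take_head_from_joined_text(segments: List[str], max_chars: int) -> str:
--     """Take the head portion of joined text segments.
--
--     Args:
--         segments (`List[str]`):
--             The text segments.
--         max_chars (`int`):
--             Maximum characters to take.
--
--     Returns:
--         `str`:
--             The head portion.
--     """
--     if max_chars <= 0 or not segments:
--         return ""
--
--     result = []
--     remaining = max_chars
--
--     for i, segment in enumerate(segments):
--         if i > 0 and remaining > 0: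
--             result.append("\n")
--             remaining -= 1
--             if remaining <= 0:
--                 break
--
--         if len(segment) <= remaining:
--             result.append(segment)
--             remaining -= len(segment)
--         else:
--             result.append(segment[:remaining])
--             break
--
--     return "".join(result)
-- ===== SOURCE B (Python) =====
-- def take_head_from_joined_text(segments, max_chars):
--     """Take the head portion of joined text segments."""
--     if max_chars <= 0:
--         return ""
--     return "\n".join(segments)[:max_chars]
-- ===== Notes on version B (the rewrite author's own statement) =====
-- stated objective: simpler
-- what changed: Replaces the per-segment budget-tracking loop with separator/truncation branches by joining all segments once and taking the max_chars-prefix of the result.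
import Mathlib
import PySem

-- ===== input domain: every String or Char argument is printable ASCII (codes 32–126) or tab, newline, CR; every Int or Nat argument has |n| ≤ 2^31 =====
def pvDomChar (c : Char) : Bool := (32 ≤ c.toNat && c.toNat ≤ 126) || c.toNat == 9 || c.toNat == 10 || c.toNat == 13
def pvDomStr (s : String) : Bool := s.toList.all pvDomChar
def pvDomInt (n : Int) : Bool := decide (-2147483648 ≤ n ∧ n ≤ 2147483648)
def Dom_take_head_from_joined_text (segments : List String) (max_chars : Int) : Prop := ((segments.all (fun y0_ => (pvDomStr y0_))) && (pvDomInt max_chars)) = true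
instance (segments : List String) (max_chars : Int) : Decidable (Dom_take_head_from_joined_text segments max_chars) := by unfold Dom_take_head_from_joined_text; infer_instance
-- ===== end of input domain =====

-- B is simpler: it joins all segments with "\n" once and takes the max_chars-prefix,
-- instead of A's per-segment budget loop with separator/truncation branches.

-- ===== PORT A =====
-- the for-loop of A: i is the enumerate index, remaining the budget, acc the 'result' list;
-- the Python 'break' after the separator and after a truncated segment ends the recursion.
def takeHeadLoopA (segs : List String) (i : Nat) (remaining : Int) (acc : List (List Char)) : List (List Char) :=
  match segs with
  | [] => acc
  | segment :: rest =>
    if i > 0 ∧ remaining > 0 then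
      let acc1 := acc ++ [['\n']]
      let rem1 := remaining - 1
      if rem1 ≤ 0 then acc1
      else
        if PySem.Chars.len segment.toList ≤ rem1 then
          takeHeadLoopA rest (i + 1) (rem1 - PySem.Chars.len segment.toList) (acc1 ++ [segment.toList])
        else acc1 ++ [PySem.Chars.slice segment.toList none (some rem1)]
    else
      if PySem.Chars.len segment.toList ≤ remaining then
        takeHeadLoopA rest (i + 1) (remaining - PySem.Chars.len segment.toList) (acc ++ [segment.toList])
      else acc ++ [PySem.Chars.slice segment.toList none (some remaining)]

def take_head_from_joined_text (segments : List String) (max_chars : Int) : String :=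
  if max_chars ≤ 0 ∨ segments = [] then ""
  else String.ofList (PySem.Chars.join [] (takeHeadLoopA segments 0 max_chars []))

-- ===== PORT B =====
def take_head_from_joined_text_alt (segments : List String) (max_chars : Int) : String :=
  if max_chars ≤ 0 then ""
  else PySem.Str.slice (PySem.Str.join "\n" segments) none (some max_chars)

-- ===== PRECONDITION & SPEC =====
def Spec_take_head_from_joined_text (segments : List String) (max_chars : Int) (out : String) : Prop := out = take_head_from_joined_text_alt segments max_chars
instance (segments : List String) (max_chars : Int) (out : String) : Decidable (Spec_take_head_from_joined_text segments max_chars out) := by unfold Spec_take_head_from_joined_text; infer_instance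

-- ===== CLAIM (what is proved, stated in full; the proofs are below) =====
def Claim_equal_take_head_from_joined_text : Prop := ∀ (segments : List String) (max_chars : Int), Dom_take_head_from_joined_text segments max_chars → Spec_take_head_from_joined_text segments max_chars (take_head_from_joined_text segments max_chars)

-- ===== LEMMAS AND PROOFS =====

theorem join_empty_sep (l : List (List Char)) : PySem.Chars.join [] l = l.flatten := by
  simp [PySem.Chars.join, List.intercalate]
  induction l with
  | nil => simp
  | cons x xs ih => cases xs <;> simp_all [List.intersperse]

-- the text produced by the loop from iteration 1 on: a '\n' before every segment
def nlflat (l : List String) : List Char := l.flatMap (fun s => '\n' :: s.toList)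

theorem slice_to_nonneg (l : List Char) (r : Int) (h : 0 ≤ r) :
    PySem.Chars.slice l none (some r) = l.take r.toNat := by
  have e : r = ((r.toNat : Nat) : Int) := by omega
  rw [e, PySem.Chars.slice_eq_listSlice, PySem.List.slice_to_natCast]
  congr 1

theorem join_nl (s : String) (rest : List String) :
    PySem.Chars.join ['\n'] ((s :: rest).map String.toList) = s.toList ++ nlflat rest := by
  simp only [PySem.Chars.join, List.intercalate, nlflat]
  induction rest generalizing s with
  | nil => simp
  | cons t ts ih =>
    have := ih t
    cases ts <;> simp_all [List.intersperse]

-- invariant of the loop from its second iteration on (i ≥ 1, budget nonnegative)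
theorem loop_tail (segs : List String) : ∀ (i : Nat) (r : Int) (acc : List (List Char)),
    0 ≤ r →
    (takeHeadLoopA segs (i + 1) r acc).flatten = acc.flatten ++ (nlflat segs).take r.toNat := by
  induction segs with
  | nil => intro i r acc _; simp [takeHeadLoopA, nlflat]
  | cons s rest ih =>
    intro i r acc hr
    have hL : PySem.Chars.len s.toList = (s.toList.length : Int) := rfl
    by_cases hpos : 0 < r
    · have hcond : i + 1 > 0 ∧ r > 0 := ⟨Nat.succ_pos i, hpos⟩
      by_cases h1 : r - 1 ≤ 0
      · -- r = 1 : just the separator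
        have hr1 : r = 1 := by omega
        simp only [takeHeadLoopA, if_pos hcond, if_pos h1]
        subst hr1
        simp [nlflat]
      · by_cases hlen : PySem.Chars.len s.toList ≤ r - 1
        · simp only [takeHeadLoopA, if_pos hcond, if_neg h1, if_pos hlen]
          rw [ih (i + 1) _ _ (by omega)]
          simp only [nlflat, List.flatMap_cons, List.flatten_append, List.flatten_cons,
            List.flatten_nil, List.append_nil, List.append_assoc]
          rw [List.take_append]
          rw [List.take_of_length_le (l := '\n' :: s.toList) (by simp only [List.length_cons]; omega)]
          have e : r.toNat - ('\n' :: s.toList).length = (r - 1 - PySem.Chars.len s.toList).toNat := by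
            simp only [List.length_cons]; omega
          rw [e]
          simp
        · -- truncated segment, break
          simp only [takeHeadLoopA, if_pos hcond, if_neg h1, if_neg hlen]
          rw [slice_to_nonneg _ _ (by omega)]
          simp only [nlflat, List.flatMap_cons, List.flatten_append, List.flatten_cons,
            List.flatten_nil, List.append_nil, List.append_assoc]
          rw [List.take_append]
          have e1 : List.take r.toNat ('\n' :: s.toList) = '\n' :: List.take (r.toNat - 1) s.toList := by
            have e : r.toNat = (r.toNat - 1) + 1 := by omega
            rw [e]; simp
          have e2 : List.take (r.toNat - ('\n' :: s.toList).length)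
              (List.flatMap (fun s => '\n' :: s.toList) rest) = [] := by
            rw [show r.toNat - ('\n' :: s.toList).length = 0 by
              simp only [List.length_cons]; omega, List.take_zero]
          rw [e1, e2]
          have e3 : (r - 1).toNat = r.toNat - 1 := by omega
          simp [e3]
    · -- r = 0 : loop keeps appending empty pieces
      have hr0 : r = 0 := by omega
      subst hr0
      have hcond : ¬ (i + 1 > 0 ∧ (0:Int) > 0) := by simp
      by_cases hlen : PySem.Chars.len s.toList ≤ (0:Int)
      · have hs : s.toList = [] := by
          refine List.eq_nil_of_length_eq_zero (by omega)
        simp only [takeHeadLoopA, if_neg hcond, if_pos hlen]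
        have e : (0 : Int) - PySem.Chars.len s.toList = 0 := by omega
        rw [e, ih (i + 1) 0 _ le_rfl]
        simp [nlflat, hs]
      · simp only [takeHeadLoopA, if_neg hcond, if_neg hlen]
        rw [slice_to_nonneg _ _ le_rfl]
        simp [nlflat]

-- the first iteration (i = 0) then the invariant gives the prefix of the '\n'-join
theorem loop_head (s : String) (rest : List String) (r : Int) (hr : 0 < r) :
    (takeHeadLoopA (s :: rest) 0 r []).flatten
      = (s.toList ++ nlflat rest).take r.toNat := by
  have hcond : ¬ ((0:Nat) > 0 ∧ r > 0) := by simp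
  have hL : PySem.Chars.len s.toList = (s.toList.length : Int) := rfl
  by_cases hlen : PySem.Chars.len s.toList ≤ r
  · simp only [takeHeadLoopA, if_neg hcond, if_pos hlen]
    rw [show (0:Nat) + 1 = 0 + 1 from rfl, loop_tail rest 0 _ _ (by omega)]
    rw [List.take_append]
    rw [List.take_of_length_le (l := s.toList) (by omega)]
    have e : r.toNat - s.toList.length = (r - PySem.Chars.len s.toList).toNat := by omega
    rw [e]
    simp
  · simp only [takeHeadLoopA, if_neg hcond, if_neg hlen]
    rw [slice_to_nonneg _ _ (by omega)]
    rw [List.take_append]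
    have e2 : r.toNat - s.length = 0 := by
      have : s.toList.length = s.length := by simp
      omega
    simp [e2]

-- ===== VERDICT (by name: the statement is the Claim_ definition above) =====
theorem take_head_from_joined_text_spec : Claim_equal_take_head_from_joined_text := by
  intro segments max_chars _
  unfold Spec_take_head_from_joined_text take_head_from_joined_text take_head_from_joined_text_alt
  by_cases hm : max_chars ≤ 0
  · simp [hm]
  · cases segments with
    | nil =>
      rw [if_pos (Or.inr rfl), if_neg hm]
      apply String.toList_inj.mp
      rw [PySem.Str.toList_slice, PySem.Str.toList_join]
      simp [PySem.Chars.join, List.intercalate, PySem.Chars.slice, PySem.List.slice]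
    | cons s rest =>
      rw [if_neg (by simp [hm]), if_neg hm]
      apply String.toList_inj.mp
      rw [PySem.Str.toList_slice, PySem.Str.toList_join]
      rw [slice_to_nonneg _ _ (by omega)]
      have hj : ("\n" : String).toList = ['\n'] := rfl
      rw [hj, join_nl]
      have : (String.ofList (PySem.Chars.join [] (takeHeadLoopA (s :: rest) 0 max_chars []))).toList
          = (takeHeadLoopA (s :: rest) 0 max_chars []).flatten := by
        rw [join_empty_sep]; simp
      rw [this, loop_head s rest max_chars (by omega)]
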